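-- pv_equiv track=rewrite | github.com/BobReed24/all-projects | python/project_euler/problem_117/sol1.py | solution
-- ===== SOURCE A (Python) =====
-- def solution(length: int = 50) -> int:
--
--     ways_number = [1] * (length + 1)
--
--     for row_length in range(length + 1):
--         for tile_length in range(2, 5):
--             for tile_start in range(row_length - tile_length + 1):
--                 ways_number[row_length] += ways_number[
--                     row_length - tile_start - tile_length
--                 ]
--
--     return ways_number[length]
-- ===== SOURCE B (Python) =====
-- def solution(length: int = 50) -> int:
--     # f(n) = f(n-1) + f(n-2) + f(n-3) + f(n-4), sliding window, O(n)
--     a, b, c, d = 0, 0, 0, 1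
--     for _ in range(length):
--         a, b, c, d = b, c, d, a + b + c + d
--     return d
-- ===== Notes on version B (the rewrite author's own statement) =====
-- stated objective: faster
-- what changed: Replaced the O(n^2) table that re-sums all earlier entries for every row with the linear recurrence f(n)=f(n-1)+f(n-2)+f(n-3)+f(n-4) maintained in a 4-value sliding window.
import Mathlib
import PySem

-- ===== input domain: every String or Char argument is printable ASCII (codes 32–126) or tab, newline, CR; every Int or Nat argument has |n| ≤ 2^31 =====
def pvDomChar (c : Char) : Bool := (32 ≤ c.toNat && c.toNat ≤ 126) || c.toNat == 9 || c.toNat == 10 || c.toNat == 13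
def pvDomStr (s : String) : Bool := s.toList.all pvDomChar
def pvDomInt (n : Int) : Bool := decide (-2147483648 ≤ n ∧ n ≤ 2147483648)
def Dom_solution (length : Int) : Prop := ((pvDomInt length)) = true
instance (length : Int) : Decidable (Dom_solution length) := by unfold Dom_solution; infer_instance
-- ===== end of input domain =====

-- B replaces A's quadratic table (re-summing all shorter rows for every row) by the
-- linear recurrence f(n)=f(n-1)+f(n-2)+f(n-3)+f(n-4) kept in a 4-value sliding window.

-- ===== PORT A =====
-- innermost loop body: ways_number[row_length] += ways_number[row_length - tile_start - tile_length]
def pvBodyA (r t : Int) (ws : List Int) (s : Int) : List Int :=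
  PySem.List.pySetD ws r (PySem.List.pyGetD ws r 0 + PySem.List.pyGetD ws (r - s - t) 0)

-- for tile_start in range(row_length - tile_length + 1): …
def pvTileA (r : Int) (ws : List Int) (t : Int) : List Int :=
  (PySem.List.pyRange 0 (r - t + 1) 1).foldl (pvBodyA r t) ws

-- for tile_length in range(2, 5): …
def pvRowA (ws : List Int) (r : Int) : List Int :=
  (PySem.List.pyRange 2 5 1).foldl (pvTileA r) ws

def solution (length : Int) : Int :=
  PySem.List.pyGetD
    ((PySem.List.pyRange 0 (length + 1) 1).foldl pvRowA
      (List.replicate (length + 1).toNat 1))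
    length 0

-- ===== PORT B =====
-- the 'for _ in range(length): a,b,c,d = b,c,d,a+b+c+d' loop of Source B
def pvLoopB : Nat → Int × Int × Int × Int → Int × Int × Int × Int
  | 0, st => st
  | n + 1, (a, b, c, d) => pvLoopB n (b, c, d, a + b + c + d)

def solution_alt (length : Int) : Int :=
  (pvLoopB length.toNat (0, 0, 0, 1)).2.2.2

-- ===== PRECONDITION & SPEC =====
-- Pre_ excludes negative length, on which Python A raises IndexError (empty table).
def Pre_solution (length : Int) : Prop := 0 ≤ length
instance (length : Int) : Decidable (Pre_solution length) := by unfold Pre_solution; infer_instance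
def pvWitness_solution : Int := (5)

def Spec_solution (length : Int) (out : Int) : Prop := out = solution_alt length
instance (length : Int) (out : Int) : Decidable (Spec_solution length out) := by unfold Spec_solution; infer_instance

-- ===== CLAIM (what is proved, stated in full; the proofs are below) =====
def Claim_equal_solution : Prop := ∀ (length : Int), Dom_solution length → Pre_solution length → Spec_solution length (solution length)

-- ===== LEMMAS AND PROOFS =====

-- reference function: value of B's window after n steps
def fN (n : Nat) : Int := (pvLoopB n (0, 0, 0, 1)).2.2.2
def f (n : Int) : Int := if n < 0 then 0 else fN n.toNat
-- prefix sums of f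
def S (k : Int) : Int := if k ≤ 0 then 0 else ∑ j ∈ Finset.range k.toNat, f j

lemma pvLoopB_succ_right (n : Nat) (st : Int × Int × Int × Int) :
    pvLoopB (n + 1) st = (let (a, b, c, d) := pvLoopB n st; (b, c, d, a + b + c + d)) := by
  induction n generalizing st with
  | zero => rfl
  | succ n ih =>
      obtain ⟨a, b, c, d⟩ := st
      show pvLoopB (n + 1) (b, c, d, a + b + c + d) = _
      rw [ih]
      rfl

lemma f_natCast (n : Nat) : f (n : Int) = fN n := by
  unfold f
  rw [if_neg (by omega)]
  simp

lemma pvLoopB_eq (n : Nat) :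
    pvLoopB n (0, 0, 0, 1) = (f ((n : Int) - 3), f ((n : Int) - 2), f ((n : Int) - 1), f n) := by
  induction n with
  | zero => decide
  | succ n ih =>
      rw [pvLoopB_succ_right, ih]
      have h1 : ((n + 1 : Nat) : Int) - 3 = (n : Int) - 2 := by push_cast; ring
      have h2 : ((n + 1 : Nat) : Int) - 2 = (n : Int) - 1 := by push_cast; ring
      have h3 : ((n + 1 : Nat) : Int) - 1 = (n : Int) := by push_cast; ring
      have h4 : f ((n + 1 : Nat) : Int) =
          f ((n : Int) - 3) + f ((n : Int) - 2) + f ((n : Int) - 1) + f (n : Int) := by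
        rw [f_natCast, fN, pvLoopB_succ_right, ih]
      simp only [h1, h2, h3, h4]

lemma f_rec (n : Nat) :
    f ((n : Int) + 1) = f ((n : Int) - 3) + f ((n : Int) - 2) + f ((n : Int) - 1) + f n := by
  have h' : f ((n + 1 : Nat) : Int) = fN (n + 1) := f_natCast (n + 1)
  rw [fN, pvLoopB_succ_right, pvLoopB_eq n] at h'
  simpa using h'

lemma S_natCast (m : Nat) : S (m : Int) = ∑ j ∈ Finset.range m, f j := by
  unfold S
  by_cases hm : m = 0
  · subst hm; simp
  · rw [if_neg (by omega), Int.toNat_natCast]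

lemma S_succ (k : Int) : S (k + 1) = S k + f k := by
  by_cases hk : k < 0
  · unfold S f
    rw [if_pos (by omega), if_pos (by omega), if_pos hk]
    ring
  · obtain ⟨m, rfl⟩ := Int.eq_ofNat_of_zero_le (by omega : 0 ≤ k)
    have h1 : ((m : Int)) + 1 = ((m + 1 : Nat) : Int) := by push_cast; ring
    rw [h1, S_natCast, S_natCast, Finset.sum_range_succ]

lemma f_key (n : Nat) :
    f n = 1 + (S ((n : Int) - 1) + S ((n : Int) - 2) + S ((n : Int) - 3)) := by
  induction n with
  | zero => decide
  | succ n ih =>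
      have hrec := f_rec n
      have e1 : S ((n : Int)) = S ((n : Int) - 1) + f ((n : Int) - 1) := by
        have h := S_succ ((n : Int) - 1)
        rw [show (n : Int) - 1 + 1 = (n : Int) from by ring] at h
        exact h
      have e2 : S ((n : Int) - 1) = S ((n : Int) - 2) + f ((n : Int) - 2) := by
        have h := S_succ ((n : Int) - 2)
        rw [show (n : Int) - 2 + 1 = (n : Int) - 1 from by ring] at h
        exact h
      have e3 : S ((n : Int) - 2) = S ((n : Int) - 3) + f ((n : Int) - 3) := by
        have h := S_succ ((n : Int) - 3)
        rw [show (n : Int) - 3 + 1 = (n : Int) - 2 from by ring] at h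
        exact h
      have hc : ((n + 1 : Nat) : Int) = (n : Int) + 1 := by push_cast; ring
      rw [hc, hrec, ih]
      have hc1 : (n : Int) + 1 - 1 = (n : Int) := by ring
      have hc2 : (n : Int) + 1 - 2 = (n : Int) - 1 := by ring
      have hc3 : (n : Int) + 1 - 3 = (n : Int) - 2 := by ring
      rw [hc1, hc2, hc3, e1, e2, e3]
      ring

-- index plumbing for one write at slot r
lemma pyGetD_set_self (ws : List Int) (r v : Int) (h0 : 0 ≤ r) (hr : r.toNat < ws.length) :
    PySem.List.pyGetD (ws.set r.toNat v) r 0 = v := by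
  rw [PySem.List.pyGetD_eq_getElem (ws.set r.toNat v) (0 : Int) h0 (by simp; omega)]
  exact List.getElem_set_self (by simpa using hr)

lemma pyGetD_set_lt (ws : List Int) (r v j : Int) (h0 : 0 ≤ r) (hr : r.toNat < ws.length)
    (hj0 : 0 ≤ j) (hjr : j < r) :
    PySem.List.pyGetD (ws.set r.toNat v) j 0 = PySem.List.pyGetD ws j 0 := by
  have hjl : j.toNat < ws.length := by omega
  rw [PySem.List.pyGetD_eq_getElem (ws.set r.toNat v) (0 : Int) hj0 (by simp; omega),
      PySem.List.pyGetD_eq_getElem ws (0 : Int) hj0 (by omega)]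
  exact List.getElem_set_ne (by omega) _

-- the innermost loop: adds the sum of the read entries into slot r
lemma inner_fold (ws : List Int) (r t : Int) (h0 : 0 ≤ r) (hr : r.toNat < ws.length)
    (ht : 2 ≤ t) (m : Nat) (hm : ∀ s : Nat, s < m → (s : Int) ≤ r - t) :
    (PySem.List.pyRange 0 (m : Int) 1).foldl (pvBodyA r t) ws
      = ws.set r.toNat
          (PySem.List.pyGetD ws r 0 + ∑ s ∈ Finset.range m, PySem.List.pyGetD ws (r - s - t) 0) := by
  induction m with
  | zero =>
      rw [PySem.List.pyRange_one_eq_nil (by omega)]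
      simp only [List.foldl_nil, Finset.range_zero, Finset.sum_empty, add_zero]
      rw [PySem.List.pyGetD_eq_getElem ws (0 : Int) h0 (by omega)]
      exact (List.set_getElem_self hr).symm
  | succ m ih =>
      have hm' : ∀ s : Nat, s < m → (s : Int) ≤ r - t := fun s hs => hm s (by omega)
      have hsm : ((m : Int)) ≤ r - t := hm m (by omega)
      have hcast : ((m + 1 : Nat) : Int) = (m : Int) + 1 := by push_cast; ring
      rw [hcast, PySem.List.pyRange_one_succ_right (by positivity), List.foldl_append, ih hm']
      simp only [List.foldl_cons, List.foldl_nil]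
      unfold pvBodyA
      have hj0 : (0 : Int) ≤ r - m - t := by omega
      have hjr : r - (m : Int) - t < r := by omega
      rw [pyGetD_set_self ws r _ h0 hr, pyGetD_set_lt ws r _ _ h0 hr hj0 hjr,
          PySem.List.pySetD_of_nonneg _ _ h0, List.set_set, Finset.sum_range_succ]
      congr 1
      ring

-- one tile length: when all entries below r hold f, the inner loop adds S (r - t + 1)
lemma tile_step (ws : List Int) (r t : Int) (h0 : 0 ≤ r) (hr : r.toNat < ws.length) (ht : 2 ≤ t)
    (hpref : ∀ j : Int, 0 ≤ j → j < r → PySem.List.pyGetD ws j 0 = f j) :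
    pvTileA r ws t = ws.set r.toNat (PySem.List.pyGetD ws r 0 + S (r - t + 1)) := by
  unfold pvTileA
  have hb : PySem.List.pyRange 0 (r - t + 1) 1 = PySem.List.pyRange 0 (((r - t + 1).toNat : Nat) : Int) 1 := by
    by_cases h : 0 ≤ r - t + 1
    · congr 1; omega
    · rw [PySem.List.pyRange_one_eq_nil (by omega), PySem.List.pyRange_one_eq_nil (by omega)]
  rw [hb, inner_fold ws r t h0 hr ht _ (fun s hs => by omega)]
  congr 1
  congr 1
  -- sum of table reads equals the prefix sum S (r - t + 1)
  by_cases hneg : r - t + 1 ≤ 0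
  · have : (r - t + 1).toNat = 0 := by omega
    rw [this]
    unfold S
    rw [if_pos hneg]
    simp
  · have hmpos : ((r - t + 1).toNat : Int) = r - t + 1 := by omega
    set m := (r - t + 1).toNat with hmdef
    have step1 : ∑ s ∈ Finset.range m, PySem.List.pyGetD ws (r - s - t) 0
        = ∑ s ∈ Finset.range m, f (((m - 1 - s : Nat) : Nat) : Int) := by
      refine Finset.sum_congr rfl (fun s hs => ?_)
      have hs' : s < m := Finset.mem_range.mp hs
      have h1 : r - (s : Int) - t = ((m - 1 - s : Nat) : Int) := by omega
      rw [h1]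
      exact hpref _ (by omega) (by omega)
    rw [step1, Finset.sum_range_reflect (fun j => f (j : Int)) m]
    rw [show S (r - t + 1) = S ((m : Int)) from by rw [hmpos]]
    exact (S_natCast m).symm

-- one row: the three tile loops turn slot r (holding 1) into f r
lemma row_step (ws : List Int) (r : Int) (h0 : 0 ≤ r) (hr : r.toNat < ws.length)
    (hpref : ∀ j : Int, 0 ≤ j → j < r → PySem.List.pyGetD ws j 0 = f j)
    (hcur : PySem.List.pyGetD ws r 0 = 1) :
    pvRowA ws r = ws.set r.toNat (f r.toNat) := by
  unfold pvRowA
  have hrng : PySem.List.pyRange 2 5 1 = [2, 3, 4] := by decide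
  rw [hrng]
  simp only [List.foldl_cons, List.foldl_nil]
  rw [tile_step ws r 2 h0 hr (by omega) hpref, hcur]
  set w1 := ws.set r.toNat (1 + S (r - 2 + 1)) with hw1
  have hr1 : r.toNat < w1.length := by simpa [hw1] using hr
  have hpref1 : ∀ j : Int, 0 ≤ j → j < r → PySem.List.pyGetD w1 j 0 = f j :=
    fun j hj0 hjr => by rw [hw1, pyGetD_set_lt ws r _ j h0 hr hj0 hjr]; exact hpref j hj0 hjr
  rw [tile_step w1 r 3 h0 hr1 (by omega) hpref1, hw1, pyGetD_set_self ws r _ h0 hr, List.set_set]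
  set w2 := ws.set r.toNat (1 + S (r - 2 + 1) + S (r - 3 + 1)) with hw2
  have hr2 : r.toNat < w2.length := by simpa [hw2] using hr
  have hpref2 : ∀ j : Int, 0 ≤ j → j < r → PySem.List.pyGetD w2 j 0 = f j :=
    fun j hj0 hjr => by rw [hw2, pyGetD_set_lt ws r _ j h0 hr hj0 hjr]; exact hpref j hj0 hjr
  rw [tile_step w2 r 4 h0 hr2 (by omega) hpref2, hw2, pyGetD_set_self ws r _ h0 hr, List.set_set]
  congr 1
  have hc : ((r.toNat : Nat) : Int) = r := by omega
  rw [f_key r.toNat, hc]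
  have c1 : r - 2 + 1 = r - 1 := by ring
  have c2 : r - 3 + 1 = r - 2 := by ring
  have c3 : r - 4 + 1 = r - 3 := by ring
  rw [c1, c2, c3]
  ring

-- the outer loop builds the table of f-values
lemma outer_fold (L : Nat) (R : Nat) (hR : R ≤ L) :
    ∃ ws : List Int,
      (PySem.List.pyRange 0 (R : Int) 1).foldl pvRowA (List.replicate L 1) = ws ∧
      ws.length = L ∧ (∀ j : Nat, j < R → ws.getD j 0 = f j) ∧
      (∀ j : Nat, R ≤ j → j < L → ws.getD j 0 = 1) := by
  induction R with
  | zero =>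
      refine ⟨List.replicate L 1, ?_, by simp, fun j hj => by omega, fun j _ hj => ?_⟩
      · rw [PySem.List.pyRange_one_eq_nil (by omega)]; rfl
      · rw [List.getD_eq_getElem _ _ (by simpa using hj)]; simp
  | succ R ih =>
      obtain ⟨ws, heq, hlen, hlow, hhigh⟩ := ih (by omega)
      have hcast : ((R + 1 : Nat) : Int) = (R : Int) + 1 := by push_cast; ring
      rw [hcast, PySem.List.pyRange_one_succ_right (by omega)]
      rw [List.foldl_append, heq]
      simp only [List.foldl_cons, List.foldl_nil]
      have hrl : (R : Int).toNat < ws.length := by omega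
      have hget : ∀ j : Nat, j < L → PySem.List.pyGetD ws (j : Int) 0 = ws.getD j 0 := by
        intro j hj
        rw [PySem.List.pyGetD_eq_getElem ws (0 : Int) (by omega) (by omega),
            List.getD_eq_getElem _ _ (by omega)]
        simp
      have hpref : ∀ j : Int, 0 ≤ j → j < (R : Int) → PySem.List.pyGetD ws j 0 = f j := by
        intro j hj0 hjr
        have hj : j = ((j.toNat : Nat) : Int) := by omega
        rw [hj, hget j.toNat (by omega), hlow j.toNat (by omega)]
      have hcur : PySem.List.pyGetD ws (R : Int) 0 = 1 := by
        rw [hget R (by omega)]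
        exact hhigh R (by omega) (by omega)
      rw [row_step ws (R : Int) (by omega) hrl hpref hcur]
      simp only [Int.toNat_natCast]
      refine ⟨_, rfl, by simpa using hlen, fun j hj => ?_, fun j hj1 hj2 => ?_⟩
      · by_cases hjR : j = R
        · subst hjR
          rw [List.getD_eq_getElem _ _ (by simpa using hrl), List.getElem_set_self (by simpa using hrl)]
        · have hjR' : j < R := by omega
          rw [List.getD_eq_getElem _ _ (by simp; omega), List.getElem_set_ne (by omega) _,
              ← List.getD_eq_getElem _ _ (by omega)]
          exact hlow j hjR'
      · rw [List.getD_eq_getElem _ _ (by simp; omega), List.getElem_set_ne (by omega) _,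
            ← List.getD_eq_getElem _ _ (by omega)]
        exact hhigh j (by omega) hj2

-- ===== VERDICT (by name: the statement is the Claim_ definition above) =====
theorem solution_spec : Claim_equal_solution := by
  intro length _ hp
  unfold Pre_solution at hp
  unfold Spec_solution solution
  set L := (length + 1).toNat with hL
  have hcast : length + 1 = ((L : Nat) : Int) := by omega
  rw [hcast]
  obtain ⟨ws, heq, hlen, hlow, _⟩ := outer_fold L L (le_refl L)
  rw [heq]
  have hl : length.toNat < L := by omega
  rw [PySem.List.pyGetD_eq_getElem ws (0 : Int) hp (by omega),
      ← List.getD_eq_getElem _ _ (by omega), hlow length.toNat hl]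
  rw [f_natCast]
  rfl
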